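-- pv_equiv track=rewrite | github.com/StruthioninePlatypus/Particle-Recognition | intensity.py | maxEnPt
-- ===== SOURCE A (Python) =====
-- def maxEnPt(pts):
--     # Returns point(s) with highest intensity
--     big = 0
--     bigs = []
--     for i in pts:
--         if i[2]>big: big = i[2]
--     for i in pts:
--         if i[2]==big: bigs.append(i)
--     return bigs
-- ===== SOURCE B (Python) =====
-- def maxEnPt(pts):
--     # Returns point(s) with highest intensity, single pass
--     big = 0
--     bigs = []
--     for i in pts:
--         if i[2] > big:
--             big = i[2]
--             bigs = [i]
--         elif i[2] == big:
--             bigs.append(i)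
--     return bigs
-- ===== Notes on version B (the rewrite author's own statement) =====
-- stated objective: alternative
-- what changed: Replaces A's two passes (one to find the maximum, one to collect its points) with a single pass that keeps a running maximum and resets the accumulator when a new maximum appears.
import Mathlib
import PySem

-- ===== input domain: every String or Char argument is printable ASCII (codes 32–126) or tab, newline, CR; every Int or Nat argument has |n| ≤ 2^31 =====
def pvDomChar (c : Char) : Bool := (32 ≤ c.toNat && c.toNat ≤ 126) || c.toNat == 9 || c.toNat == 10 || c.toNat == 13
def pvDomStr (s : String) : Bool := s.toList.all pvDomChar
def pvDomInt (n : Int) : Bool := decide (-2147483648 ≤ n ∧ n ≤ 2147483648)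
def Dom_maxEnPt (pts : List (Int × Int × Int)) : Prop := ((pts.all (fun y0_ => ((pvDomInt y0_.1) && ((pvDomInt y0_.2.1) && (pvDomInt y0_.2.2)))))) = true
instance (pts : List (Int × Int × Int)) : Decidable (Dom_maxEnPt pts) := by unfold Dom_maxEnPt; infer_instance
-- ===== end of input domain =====

-- ===== PORT A =====
-- B replaces A's two passes with one pass keeping a running maximum and an accumulator (objective: alternative; return value only).
def maxEnPt (pts : List (Int × Int × Int)) : List (Int × Int × Int) :=
  let big : Int := pts.foldl (fun big i => if i.2.2 > big then i.2.2 else big) 0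
  pts.foldl (fun bigs i => if i.2.2 == big then bigs ++ [i] else bigs) ([] : List (Int × Int × Int))

-- ===== PORT B =====
def maxEnPt_alt (pts : List (Int × Int × Int)) : List (Int × Int × Int) :=
  (pts.foldl
    (fun (s : Int × List (Int × Int × Int)) i =>
      if i.2.2 > s.1 then (i.2.2, [i])
      else if i.2.2 == s.1 then (s.1, s.2 ++ [i])
      else s)
    ((0 : Int), ([] : List (Int × Int × Int)))).2

-- ===== PRECONDITION & SPEC =====
def Spec_maxEnPt (pts : List (Int × Int × Int)) (out : List (Int × Int × Int)) : Prop := out = maxEnPt_alt pts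
instance (pts : List (Int × Int × Int)) (out : List (Int × Int × Int)) : Decidable (Spec_maxEnPt pts out) := by unfold Spec_maxEnPt; infer_instance

-- ===== CLAIM (what is proved, stated in full; the proofs are below) =====
def Claim_equal_maxEnPt : Prop := ∀ (pts : List (Int × Int × Int)), Dom_maxEnPt pts → Spec_maxEnPt pts (maxEnPt pts)

-- ===== LEMMAS AND PROOFS =====

def pvBigA (l : List (Int × Int × Int)) (b : Int) : Int :=
  l.foldl (fun big i => if i.2.2 > big then i.2.2 else big) b

theorem pvBigA_le (l : List (Int × Int × Int)) (b : Int) : b ≤ pvBigA l b := by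
  induction l generalizing b with
  | nil => simp [pvBigA]
  | cons i t ih =>
    simp only [pvBigA, List.foldl_cons] at *
    split_ifs with h
    · exact le_trans (le_of_lt h) (ih _)
    · exact ih _

theorem pvFold_alt (l : List (Int × Int × Int)) (b : Int) (acc : List (Int × Int × Int)) :
    l.foldl
      (fun (s : Int × List (Int × Int × Int)) i =>
        if i.2.2 > s.1 then (i.2.2, [i])
        else if i.2.2 == s.1 then (s.1, s.2 ++ [i])
        else s) (b, acc)
    = (pvBigA l b,
       (if b = pvBigA l b then acc else []) ++ l.filter (fun i => i.2.2 == pvBigA l b)) := by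
  induction l generalizing b acc with
  | nil => simp [pvBigA]
  | cons i t ih =>
    by_cases h : i.2.2 > b
    · have hM : pvBigA (i :: t) b = pvBigA t i.2.2 := by simp [pvBigA, h]
      have hle : i.2.2 ≤ pvBigA t i.2.2 := pvBigA_le t i.2.2
      have hb : ¬ b = pvBigA t i.2.2 := ne_of_lt (lt_of_lt_of_le h hle)
      have hstep : (if i.2.2 > b then ((i.2.2 : Int), [i])
          else if i.2.2 == b then (b, acc ++ [i]) else (b, acc)) = (i.2.2, [i]) := by
        rw [if_pos h]
      rw [List.foldl_cons]
      rw [show (if i.2.2 > (b, acc).1 then ((i.2.2 : Int), [i])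
          else if i.2.2 == (b, acc).1 then ((b, acc).1, (b, acc).2 ++ [i]) else (b, acc)) = (i.2.2, [i]) from hstep]
      rw [ih, hM, if_neg hb]
      by_cases hi : i.2.2 = pvBigA t i.2.2
      · rw [if_pos hi, List.filter_cons,
           if_pos (show (i.2.2 == pvBigA t i.2.2) = true from beq_iff_eq.mpr hi)]
        simp
      · simp [hi]
    · have hM : pvBigA (i :: t) b = pvBigA t b := by simp [pvBigA, h]
      by_cases he : i.2.2 = b
      · have hstep : (if i.2.2 > (b, acc).1 then ((i.2.2 : Int), [i])
            else if i.2.2 == (b, acc).1 then ((b, acc).1, (b, acc).2 ++ [i]) else ((b : Int), acc)) = (b, acc ++ [i]) := by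
          simp [he]
        rw [List.foldl_cons, hstep, ih, hM]
        by_cases hb : b = pvBigA t b
        · simp [← hb, he]
        · have hi : ¬ (i.2.2 = pvBigA t b) := by rw [he]; exact hb
          simp [hi, hb]
      · have hstep : (if i.2.2 > (b, acc).1 then ((i.2.2 : Int), [i])
            else if i.2.2 == (b, acc).1 then ((b, acc).1, (b, acc).2 ++ [i]) else ((b : Int), acc)) = (b, acc) := by
          simp [h, he]
        have hi : ¬ (i.2.2 = pvBigA t b) := by
          intro hc
          have hlt : i.2.2 < b := lt_of_le_of_ne (not_lt.mp h) he
          exact absurd (hc ▸ pvBigA_le t b) (not_le.mpr hlt)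
        rw [List.foldl_cons, hstep, ih, hM]
        simp [hi]

-- ===== VERDICT (by name: the statement is the Claim_ definition above) =====
theorem maxEnPt_spec : Claim_equal_maxEnPt := by
  intro pts _
  unfold Spec_maxEnPt maxEnPt maxEnPt_alt
  rw [pvFold_alt]
  rw [PySem.List.foldl_append_if_eq_filter]
  simp [pvBigA]
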